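-- pv_equiv track=rewrite | github.com/AndrewShepherd/leetcode-python | count-the-number-of-ideal-arrays/count_the_number_of_ideal_arrays.py | enumerateSubPatterns
-- ===== SOURCE A (Python) =====
-- def enumerateSubPatterns(pattern):
--     if not pattern:
--         yield pattern
--     else:
--         yield from enumerateSubPatterns(pattern[1:])
--         for i in range(1, pattern[0] + 1):
--             for subPattern in enumerateSubPatterns(pattern[1:]):
--                 yield (i,) + subPattern
-- ===== SOURCE B (Python) =====
-- def enumerateSubPatterns(pattern):
--     if not pattern:
--         yield pattern
--         return
--     result = [()]
--     for p in reversed(pattern):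
--         result = result + [(i,) + s for i in range(1, p + 1) for s in result]
--     yield from result
-- ===== Notes on version B (the rewrite author's own statement) =====
-- stated objective: alternative
-- what changed: Replaces the naive recursive generator (which re-enumerates the tail once per outer index) by a single iterative right-to-left fold that keeps the accumulated list of sub-patterns and extends it once per pattern entry, preserving the exact output order.
import Mathlib
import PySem

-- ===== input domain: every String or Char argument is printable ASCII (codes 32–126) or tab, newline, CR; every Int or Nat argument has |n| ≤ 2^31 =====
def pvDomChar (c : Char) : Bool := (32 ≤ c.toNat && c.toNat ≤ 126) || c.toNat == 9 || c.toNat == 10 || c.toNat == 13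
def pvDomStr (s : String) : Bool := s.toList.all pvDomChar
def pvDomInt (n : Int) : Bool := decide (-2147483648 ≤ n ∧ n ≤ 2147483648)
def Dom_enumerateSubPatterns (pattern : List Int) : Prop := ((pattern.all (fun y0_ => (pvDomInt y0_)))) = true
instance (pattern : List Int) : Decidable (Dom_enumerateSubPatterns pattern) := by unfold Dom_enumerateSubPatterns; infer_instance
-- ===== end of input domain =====

-- B replaces the recursive generator by an iterative right-to-left fold accumulating the same
-- list of sub-patterns in the same order (alternative decomposition; avoids re-enumerating the tail per index).
-- ===== PORT A =====
-- A: recursive generator; for nonempty input it yields the tail's sub-patterns, then for each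
-- i in range(1, pattern[0]+1) re-enumerates the tail and yields (i,)+subPattern.
def enumerateSubPatterns (pattern : List Int) : List (List Int) :=
  match pattern with
  | [] => [[]]
  | p :: rest =>
      enumerateSubPatterns rest ++
        (PySem.List.pyRange 1 (p + 1) 1).flatMap (fun i =>
          (enumerateSubPatterns rest).map (fun subPattern => i :: subPattern))

-- ===== PORT B =====
-- B: `result = result + [(i,) + s for i in range(1, p + 1) for s in result]` for one entry p
def pvStep (result : List (List Int)) (p : Int) : List (List Int) :=
  result ++ (PySem.List.pyRange 1 (p + 1) 1).flatMap (fun i => result.map (fun s => i :: s))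

def enumerateSubPatterns_alt (pattern : List Int) : List (List Int) :=
  if pattern = [] then [pattern]  -- "yield pattern": the empty tuple itself
  else pattern.reverse.foldl pvStep [[]]

-- ===== PRECONDITION & SPEC =====
def Spec_enumerateSubPatterns (pattern : List Int) (out : List (List Int)) : Prop := out = enumerateSubPatterns_alt pattern
instance (pattern : List Int) (out : List (List Int)) : Decidable (Spec_enumerateSubPatterns pattern out) := by unfold Spec_enumerateSubPatterns; infer_instance

-- ===== CLAIM (what is proved, stated in full; the proofs are below) =====
def Claim_equal_enumerateSubPatterns : Prop := ∀ (pattern : List Int), Dom_enumerateSubPatterns pattern → Spec_enumerateSubPatterns pattern (enumerateSubPatterns pattern)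

-- ===== LEMMAS AND PROOFS =====

-- ===== VERDICT (by name: the statement is the Claim_ definition above) =====
-- the fold over the reversed pattern computes exactly A's recursion
theorem foldl_pvStep_eq (pattern : List Int) :
    pattern.reverse.foldl pvStep [[]] = enumerateSubPatterns pattern := by
  induction pattern with
  | nil => simp [enumerateSubPatterns]
  | cons p rest ih =>
      simp [List.foldl_append, ih, enumerateSubPatterns, pvStep]

-- ===== VERDICT (by name: the statement is the Claim_ definition above) =====
theorem enumerateSubPatterns_spec : Claim_equal_enumerateSubPatterns := by
  intro pattern _
  unfold Spec_enumerateSubPatterns enumerateSubPatterns_alt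
  by_cases h : pattern = []
  · subst h; simp [enumerateSubPatterns]
  · rw [if_neg h, foldl_pvStep_eq]
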